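-- pv_equiv track=rewrite | github.com/miklakt/bulls_and_cows | bulls_and_cows.py | strike_out
-- ===== SOURCE A (Python) =====
-- def give_answer(secret_number : str, guess :str):
--     bulls = 0
--     cows = 0
--     for i, digit in enumerate(guess):
--         if digit in secret_number:
--             if digit == secret_number[i]: bulls+=1
--             else: cows+=1
--     return bulls, cows
--
-- def check_if_secret_possible(candidate_number: str, known_number : str, n_bulls : str, n_cows : str):
--     bulls, cows = give_answer(known_number, candidate_number)
--     if (bulls==n_bulls) and (cows==n_cows):
--         return True
--     else:
--         return False
--
-- def strike_out(candidate_list: list, known_number : str, n_bulls : str, n_cows : str):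
--     rest =[]
--     stricked_out = 0
--     for candidate in candidate_list:
--         if check_if_secret_possible(candidate, known_number, n_bulls, n_cows):
--             rest.append(candidate)
--         else:
--             stricked_out+=1
--     return rest, stricked_out
-- ===== SOURCE B (Python) =====
-- def strike_out(candidate_list: list, known_number: str, n_bulls: str, n_cows: str):
--     # Group every candidate by the answer it would have produced, then look the
--     # target answer up once: a hash index instead of a per-candidate filter.
--     buckets = {}
--     for candidate in candidate_list:
--         bulls = sum(x == y for x, y in zip(candidate, known_number))
--         present = sum(candidate.count(ch) for ch in set(candidate) if ch in known_number)
--         key = (bulls, present - bulls)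
--         buckets.setdefault(key, []).append(candidate)
--     rest = buckets.get((n_bulls, n_cows), [])
--     return rest, len(candidate_list) - len(rest)
-- ===== Notes on version B (the rewrite author's own statement) =====
-- stated objective: alternative
-- what changed: Replaces A's per-candidate boolean filter (nested mutable bulls/cows counters, rest/stricked_out accumulators) by a grouping pass that buckets every candidate in a dict keyed by its (bulls, cows) answer followed by ONE lookup of the target answer, with bulls counted by zipping candidate against the secret and cows derived from a per-distinct-character str.count sum.
import Mathlib
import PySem

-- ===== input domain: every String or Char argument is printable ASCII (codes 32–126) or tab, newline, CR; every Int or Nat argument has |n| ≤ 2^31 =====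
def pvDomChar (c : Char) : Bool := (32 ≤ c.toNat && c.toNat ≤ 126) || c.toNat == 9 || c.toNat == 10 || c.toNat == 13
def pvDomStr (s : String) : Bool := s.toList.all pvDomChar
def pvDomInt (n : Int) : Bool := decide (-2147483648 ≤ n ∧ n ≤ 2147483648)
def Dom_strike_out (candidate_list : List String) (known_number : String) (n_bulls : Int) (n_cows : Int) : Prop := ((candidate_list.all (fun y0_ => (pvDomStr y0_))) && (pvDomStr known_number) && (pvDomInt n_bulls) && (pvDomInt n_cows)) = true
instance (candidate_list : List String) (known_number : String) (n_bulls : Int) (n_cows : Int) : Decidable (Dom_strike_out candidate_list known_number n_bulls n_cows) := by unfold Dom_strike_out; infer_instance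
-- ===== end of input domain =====

-- B groups all candidates into a dict keyed by their (bulls, cows) answer (bulls via zip,
-- present via per-distinct-character counts) and looks the target answer up once;
-- alternative decomposition, same cost.

-- ===== PORT A =====
-- for i, digit in enumerate(guess): if digit in secret: if digit == secret[i]: bulls+=1 else cows+=1
-- (`none` = the IndexError secret_number[i] raises)
def strike_out_ga_loop (secret : String) (l : List Char) (i : Int) (bulls cows : Int) :
    Option (Int × Int) :=
  match l with
  | [] => some (bulls, cows)
  | d :: rest =>
    if d ∈ secret.toList then
      match PySem.Str.pyGet? secret i with
      | none => none
      | some ch =>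
        if d = ch then strike_out_ga_loop secret rest (i+1) (bulls+1) cows
        else strike_out_ga_loop secret rest (i+1) bulls (cows+1)
    else strike_out_ga_loop secret rest (i+1) bulls cows

def give_answer (secret_number : String) (guess : String) : Option (Int × Int) :=
  strike_out_ga_loop secret_number guess.toList 0 0 0

def check_if_secret_possible (candidate_number : String) (known_number : String)
    (n_bulls : Int) (n_cows : Int) : Option Bool :=
  match give_answer known_number candidate_number with
  | none => none
  | some (bulls, cows) => if bulls = n_bulls ∧ cows = n_cows then some true else some false

def strike_out_loop (cands : List String) (known : String) (nb nc : Int)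
    (rest : List String) (so : Int) : Option (List String × Int) :=
  match cands with
  | [] => some (rest, so)
  | c :: t =>
    match check_if_secret_possible c known nb nc with
    | none => none
    | some true => strike_out_loop t known nb nc (rest ++ [c]) so
    | some false => strike_out_loop t known nb nc rest (so + 1)

def strike_out (candidate_list : List String) (known_number : String) (n_bulls : Int) (n_cows : Int) : List String × Int :=
  (strike_out_loop candidate_list known_number n_bulls n_cows [] 0).getD ([], 0)

-- ===== PORT B =====
-- bulls = sum(x == y for x, y in zip(candidate, known_number))          (0/1-sum = countP)
-- present = sum(candidate.count(ch) for ch in set(candidate) if ch in known_number)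
--           (order-independent sum over the set's elements)
-- key = (bulls, present - bulls)
def strike_out_alt_key (known : String) (c : String) : Int × Int :=
  let bulls : Int := ((c.toList.zip known.toList).countP (fun p => p.1 == p.2) : Nat)
  let present : Int :=
    (((PySem.Set.ofList c.toList).filter (fun ch => known.toList.contains ch)).map
      (fun ch => (c.toList.count ch : Int))).sum
  (bulls, present - bulls)

-- buckets.setdefault(key, []).append(candidate)  (= d[key] gets default [] then c appended: Dict.modify);
-- rest = buckets.get((n_bulls, n_cows), [])
def strike_out_alt (candidate_list : List String) (known_number : String) (n_bulls : Int) (n_cows : Int) : List String × Int :=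
  let buckets : PySem.Dict (Int × Int) (List String) :=
    candidate_list.foldl
      (fun d c => d.modify (strike_out_alt_key known_number c) [] (· ++ [c]))
      PySem.Dict.empty
  let rest := buckets.getD (n_bulls, n_cows) []
  (rest, (candidate_list.length : Int) - (rest.length : Int))

-- ===== PRECONDITION & SPEC =====
-- Pre_ excludes exactly the inputs where A raises IndexError: a candidate having, at a
-- position past the end of known_number, a character that occurs in known_number.
def Pre_strike_out (candidate_list : List String) (known_number : String) (n_bulls : Int) (n_cows : Int) : Prop :=
  (candidate_list.all (fun c =>
    (c.toList.drop known_number.toList.length).all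
      (fun d => ! known_number.toList.contains d))) = true
instance (candidate_list : List String) (known_number : String) (n_bulls : Int) (n_cows : Int) : Decidable (Pre_strike_out candidate_list known_number n_bulls n_cows) := by unfold Pre_strike_out; infer_instance

def pvWitness_strike_out : List String × String × Int × Int := (["12", "21", "13", "45"], "12", 1, 1)

def Spec_strike_out (candidate_list : List String) (known_number : String) (n_bulls : Int) (n_cows : Int) (out : List String × Int) : Prop := out = strike_out_alt candidate_list known_number n_bulls n_cows
instance (candidate_list : List String) (known_number : String) (n_bulls : Int) (n_cows : Int) (out : List String × Int) : Decidable (Spec_strike_out candidate_list known_number n_bulls n_cows out) := by unfold Spec_strike_out; infer_instance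

-- ===== CLAIM (what is proved, stated in full; the proofs are below) =====
def Claim_equal_strike_out : Prop := ∀ (candidate_list : List String) (known_number : String) (n_bulls : Int) (n_cows : Int), Dom_strike_out candidate_list known_number n_bulls n_cows → Pre_strike_out candidate_list known_number n_bulls n_cows → Spec_strike_out candidate_list known_number n_bulls n_cows (strike_out candidate_list known_number n_bulls n_cows)

-- ===== LEMMAS AND PROOFS =====

-- the Bool precondition, in propositional form
lemma pv_pre_prop {cl : List String} {known : String} {nb nc : Int}
    (h : Pre_strike_out cl known nb nc) :
    ∀ c ∈ cl, ∀ d ∈ c.toList.drop known.toList.length, d ∉ known.toList := by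
  intro c hcm d hdm
  simp only [Pre_strike_out, List.all_eq_true] at h
  have := h c hcm d hdm
  simpa using this

-- counts of exact positional matches / of matches-at-wrong-place, from index i on
def pvBullsAux (s : List Char) (l : List Char) (i : Nat) : Nat :=
  match l with
  | [] => 0
  | d :: t => (if s[i]? = some d then 1 else 0) + pvBullsAux s t (i+1)

def pvCowsAux (s : List Char) (l : List Char) (i : Nat) : Nat :=
  match l with
  | [] => 0
  | d :: t => (if d ∈ s ∧ s[i]? ≠ some d then 1 else 0) + pvCowsAux s t (i+1)

lemma pv_ga_loop_eq (known : String) (l : List Char) (i : Nat) (b c : Int)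
    (hp : ∀ k (hk : k < l.length), known.toList.length ≤ i + k → l[k] ∉ known.toList) :
    strike_out_ga_loop known l (i : Int) b c =
      some (b + pvBullsAux known.toList l i, c + pvCowsAux known.toList l i) := by
  induction l generalizing i b c with
  | nil => simp [strike_out_ga_loop, pvBullsAux, pvCowsAux]
  | cons d t ih =>
    have hp0 := hp 0 (by simp)
    have hpt : ∀ k (hk : k < t.length), known.toList.length ≤ (i+1) + k →
        t[k] ∉ known.toList := by
      intro k hk hle
      have := hp (k+1) (by simpa using Nat.succ_lt_succ hk) (by omega)
      simpa using this
    have hcast : (i : Int) + 1 = ((i+1 : Nat) : Int) := by push_cast; ring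
    by_cases hmem : d ∈ known.toList
    · have hi : i < known.toList.length := by
        by_contra h
        exact hp0 (by simpa using h) hmem
      have hsome : known.toList[i]? = some known.toList[i] := List.getElem?_eq_getElem hi
      by_cases heq : d = known.toList[i]
      · have h1 : known.toList[i]? = some d := by rw [hsome, heq]
        simp only [strike_out_ga_loop, if_pos hmem, PySem.Str.pyGet?_natCast, h1]
        have h2 : ¬ (d ∈ known.toList ∧ known.toList[i]? ≠ some d) := fun h => h.2 h1
        rw [if_true, hcast, ih (i+1) (b+1) c hpt]
        simp only [pvBullsAux, pvCowsAux, Option.some.injEq, Prod.mk.injEq]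
        rw [if_pos h1, if_neg h2]
        constructor <;> (push_cast; omega)
      · have h1 : known.toList[i]? ≠ some d := by
          rw [hsome]; intro h; exact heq (Option.some_injective _ h).symm
        simp only [strike_out_ga_loop, if_pos hmem, PySem.Str.pyGet?_natCast, hsome]
        rw [if_neg heq, hcast, ih (i+1) b (c+1) hpt]
        simp only [pvBullsAux, pvCowsAux, Option.some.injEq, Prod.mk.injEq]
        rw [if_neg h1, if_pos (And.intro hmem h1)]
        constructor <;> (push_cast; omega)
    · have h1 : known.toList[i]? ≠ some d := fun h => hmem (List.mem_of_getElem? h)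
      have h2 : ¬ (d ∈ known.toList ∧ known.toList[i]? ≠ some d) := fun h => hmem h.1
      simp only [strike_out_ga_loop, if_neg hmem]
      rw [hcast, ih (i+1) b c hpt]
      simp only [pvBullsAux, pvCowsAux, Option.some.injEq, Prod.mk.injEq]
      rw [if_neg h1, if_neg h2]
      constructor <;> (push_cast; omega)

-- B's zip count of positional matches equals the indexed recursion
lemma pv_bulls_zip (s : List Char) (l : List Char) (i : Nat) :
    (l.zip (s.drop i)).countP (fun p => p.1 == p.2) = pvBullsAux s l i := by
  induction l generalizing i with
  | nil => simp [pvBullsAux]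
  | cons d t ih =>
    by_cases hi : i < s.length
    · have hdrop : s.drop i = s[i] :: s.drop (i+1) := List.drop_eq_getElem_cons hi
      rw [hdrop]
      simp only [List.zip_cons_cons, List.countP_cons, pvBullsAux, ih (i+1),
        List.getElem?_eq_getElem hi]
      by_cases h : d = s[i]
      · simp [h, Nat.add_comm]
      · have hne : (d == s[i]) = false := by
          simp only [beq_eq_false_iff_ne, ne_eq]; exact h
        have hnone : ¬ (some s[i] = some d) := by
          intro hc; exact h (Option.some_injective _ hc).symm
        simp [hne, hnone]
    · have hdrop : s.drop i = [] := List.drop_eq_nil_of_le (by omega)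
      have hnone : s[i]? = none := List.getElem?_eq_none (by omega)
      have hdrop' : s.drop (i+1) = [] := List.drop_eq_nil_of_le (by omega)
      rw [hdrop]
      simp only [List.zip_nil_right, List.countP_nil, pvBullsAux, hnone]
      rw [← ih (i+1), hdrop']
      simp

-- bulls + cows = number of guessed characters present in the secret
lemma pv_bulls_add_cows (s : List Char) (l : List Char) (i : Nat) :
    pvBullsAux s l i + pvCowsAux s l i = l.countP (fun d => s.contains d) := by
  induction l generalizing i with
  | nil => simp [pvBullsAux, pvCowsAux]
  | cons d t ih =>
    rw [List.countP_cons]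
    simp only [pvBullsAux, pvCowsAux]
    rw [← ih (i+1)]
    by_cases h : s[i]? = some d
    · have hmem : d ∈ s := List.mem_of_getElem? h
      simp [h, hmem]
      try omega
    · by_cases hmem : d ∈ s
      · simp [h, hmem]
        try omega
      · simp [h, hmem]
        try omega

-- B's per-distinct-character sum of counts equals the membership count
lemma pv_present_eq (l : List Char) (ks : List Char) :
    (((PySem.Set.ofList l).filter (fun ch => ks.contains ch)).map
      (fun ch => (l.count ch : Int))).sum = (l.countP (fun d => ks.contains d) : Int) := by
  have hperm : (PySem.Set.ofList l).Perm l.dedup := by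
    apply (List.perm_ext_iff_of_nodup (PySem.Set.nodup_ofList l) l.nodup_dedup).mpr
    intro a
    rw [PySem.Set.mem_ofList, List.mem_dedup]
  have hperm2 : (((PySem.Set.ofList l).filter (fun ch => ks.contains ch)).map
      (fun ch => (l.count ch : Int))).Perm
      (((l.dedup.filter (fun ch => ks.contains ch)).map (fun ch => (l.count ch : Int)))) :=
    (hperm.filter _).map _
  rw [hperm2.sum_eq]
  rw [← List.sum_map_count_dedup_filter_eq_countP (fun d => ks.contains d) l]
  rw [Nat.cast_list_sum, List.map_map]
  rfl

-- A's per-candidate check computes whether B's key equals the queried answer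
lemma pv_check_eq (known : String) (nb nc : Int) (c : String)
    (hc : ∀ d ∈ c.toList.drop known.toList.length, d ∉ known.toList) :
    check_if_secret_possible c known nb nc =
      some (strike_out_alt_key known c == (nb, nc)) := by
  have hp : ∀ k (hk : k < c.toList.length), known.toList.length ≤ 0 + k →
      c.toList[k] ∉ known.toList := by
    intro k hk hle0
    have hk2 : known.toList.length ≤ k := by omega
    have hlt : k - known.toList.length < (c.toList.drop known.toList.length).length := by
      rw [List.length_drop]; omega
    have hrepr : c.toList[k] = (c.toList.drop known.toList.length)[k - known.toList.length]'hlt := by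
      rw [List.getElem_drop]; congr 1; omega
    rw [hrepr]
    exact hc _ (List.getElem_mem hlt)
  have hloop := pv_ga_loop_eq known c.toList 0 0 0 hp
  rw [Nat.cast_zero] at hloop
  have hzip := pv_bulls_zip known.toList c.toList 0
  rw [List.drop_zero] at hzip
  have hsum := pv_bulls_add_cows known.toList c.toList 0
  unfold check_if_secret_possible give_answer strike_out_alt_key
  simp only [hloop, zero_add, pv_present_eq, hzip]
  have hcows : ((c.toList.countP (fun d => known.toList.contains d) : Nat) : Int)
      - (pvBullsAux known.toList c.toList 0 : Int) = (pvCowsAux known.toList c.toList 0 : Int) := by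
    rw [← hsum]; push_cast; ring
  rw [hcows]
  split_ifs with hif
  · simp [hif.1, hif.2]
  · rw [Classical.not_and_iff_not_or_not] at hif
    rcases hif with h | h <;> simp [Prod.ext_iff, h]

-- the outer loop builds (rest ++ filter-by-key, so + #non-matching)
lemma pv_so_loop (known : String) (nb nc : Int) (cands : List String)
    (rest : List String) (so : Int)
    (h : ∀ c ∈ cands, ∀ d ∈ c.toList.drop known.toList.length, d ∉ known.toList) :
    strike_out_loop cands known nb nc rest so =
      some (rest ++ cands.filter (fun c => strike_out_alt_key known c == (nb, nc)),
            so + (cands.countP (fun c => ! (strike_out_alt_key known c == (nb, nc))) : Int)) := by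
  induction cands generalizing rest so with
  | nil => simp [strike_out_loop]
  | cons c t ih =>
    have hc := h c (by simp)
    have ht : ∀ c' ∈ t, ∀ d ∈ c'.toList.drop known.toList.length, d ∉ known.toList := by
      intro c' hc' ; exact h c' (List.mem_cons_of_mem _ hc')
    simp only [strike_out_loop, pv_check_eq known nb nc c hc]
    by_cases hm : (strike_out_alt_key known c == (nb, nc)) = true
    · rw [hm]
      rw [ih (rest ++ [c]) so ht]
      simp [hm]
    · have hm' : (strike_out_alt_key known c == (nb, nc)) = false := by
        cases hb : (strike_out_alt_key known c == (nb, nc))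
        · rfl
        · exact absurd hb hm
      rw [hm']
      rw [ih rest (so + 1) ht]
      simp [hm']
      ring

-- B's bucket dict, queried at any key, yields exactly the candidates with that key
lemma pv_buckets_getD (known : String) (cl : List String) (q : Int × Int) :
    (cl.foldl (fun d c => d.modify (strike_out_alt_key known c) [] (· ++ [c]))
        (PySem.Dict.empty : PySem.Dict (Int × Int) (List String))).getD q []
      = cl.filter (fun c => strike_out_alt_key known c == q) := by
  have hmap : cl.foldl (fun d c => d.modify (strike_out_alt_key known c) [] (· ++ [c]))
      (PySem.Dict.empty : PySem.Dict (Int × Int) (List String))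
    = (cl.map (fun c => (strike_out_alt_key known c, c))).foldl
        (fun d p => d.modify p.1 [] (· ++ [p.2])) PySem.Dict.empty := by
    rw [List.foldl_map]
  rw [hmap, PySem.Dict.getD_foldl_modify_append]
  rw [List.filter_map, List.map_map]
  simp [Function.comp_def]

-- ===== VERDICT (by name: the statement is the Claim_ definition above) =====
theorem strike_out_spec : Claim_equal_strike_out := by
  intro cl known nb nc _hdom hpre
  unfold Spec_strike_out strike_out strike_out_alt
  rw [pv_so_loop known nb nc cl [] 0 (pv_pre_prop hpre)]
  simp only [List.nil_append, Option.getD_some, zero_add, pv_buckets_getD]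
  have hlen : cl.length = cl.countP (fun c => strike_out_alt_key known c == (nb, nc))
      + cl.countP (fun c => ! (strike_out_alt_key known c == (nb, nc))) := by
    have hfe : (fun c => ! (strike_out_alt_key known c == (nb, nc)))
        = (fun c => ! decide (strike_out_alt_key known c = (nb, nc))) := by
      funext c; rw [Bool.beq_eq_decide_eq]
    rw [hfe]
    simpa using List.length_eq_countP_add_countP (l := cl) (fun c => strike_out_alt_key known c == (nb, nc))
  have hfl : (cl.filter (fun c => strike_out_alt_key known c == (nb, nc))).length
      = cl.countP (fun c => strike_out_alt_key known c == (nb, nc)) :=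
    List.countP_eq_length_filter.symm
  have : (cl.countP (fun c => ! (strike_out_alt_key known c == (nb, nc))) : Int)
      = (cl.length : Int)
        - ((cl.filter (fun c => strike_out_alt_key known c == (nb, nc))).length : Int) := by
    rw [hfl]; omega
  rw [this]
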